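-- pv_equiv track=rewrite | github.com/rahulgupta2018/ai-code-review-multi-agent | tools/engineering_practices_evaluator.py | _check_indentation_consistency
-- ===== SOURCE A (Python) =====
-- from typing import Dict, Any, List, Optional
--
-- def _check_indentation_consistency(lines: List[str]) -> bool:
--     """Check if indentation is consistent."""
--     indents = []
--     for line in lines:
--         if line.strip():
--             indent = len(line) - len(line.lstrip())
--             if indent > 0:
--                 indents.append(indent)
--
--     if not indents:
--         return True
--
--     # Check if all indentations are multiples of the smallest indent
--     min_indent = min(indents)
--     if min_indent == 0:
--         return True
--
--     return all(indent % min_indent == 0 for indent in indents)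
-- ===== SOURCE B (Python) =====
-- from typing import List
--
--
-- def _gcd(a, b):
--     while b:
--         a, b = b, a % b
--     return a
--
--
-- def _check_indentation_consistency(lines: List[str]) -> bool:
--     """Single pass: fold gcd and min of positive indents; consistent iff gcd == min."""
--     g = 0
--     m = None
--     for line in lines:
--         if line.strip():
--             indent = len(line) - len(line.lstrip())
--             if indent > 0:
--                 g = _gcd(g, indent)
--                 if m is None or indent < m:
--                     m = indent
--     return m is None or g == m
-- ===== Notes on version B (the rewrite author's own statement) =====
-- stated objective: alternative
-- what changed: Replaced the two-phase collect-then-scan (build the indents list, take min, rescan checking indent % min == 0) by a single pass that folds a hand-written Euclid gcd and the running minimum over the positive indents and decides via gcd == min.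
import Mathlib
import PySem

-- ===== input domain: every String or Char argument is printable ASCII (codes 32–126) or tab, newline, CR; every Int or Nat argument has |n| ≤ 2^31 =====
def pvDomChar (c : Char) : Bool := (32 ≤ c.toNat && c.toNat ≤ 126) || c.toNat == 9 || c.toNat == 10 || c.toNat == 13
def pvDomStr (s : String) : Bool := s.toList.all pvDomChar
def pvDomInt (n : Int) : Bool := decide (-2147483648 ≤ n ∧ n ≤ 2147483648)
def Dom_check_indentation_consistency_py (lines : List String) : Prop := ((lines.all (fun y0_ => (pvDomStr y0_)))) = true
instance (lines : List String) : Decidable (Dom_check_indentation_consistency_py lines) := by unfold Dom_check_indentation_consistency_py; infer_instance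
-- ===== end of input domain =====

-- B replaces A's collect-then-rescan (build the indent list, take min, rescan for indent % min == 0)
-- by one pass folding a hand-written Euclid gcd and the running minimum, returning gcd == min.

-- ===== PORT A =====
def check_indentation_consistency_py (lines : List String) : Bool :=
  let indents : List Int :=
    lines.foldl (fun acc line =>
      if PySem.Str.strip line ≠ "" then
        let indent : Int := PySem.Str.len line - PySem.Str.len (PySem.Str.lstrip line)
        if indent > 0 then acc ++ [indent] else acc
      else acc) []
  if indents = [] then true
  else
    match PySem.List.min? indents id with
    | none => true   -- unreachable: indents ≠ []
    | some min_indent =>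
      if min_indent = 0 then true
      else indents.all (fun indent => PySem.Int.mod indent min_indent == 0)

-- ===== PORT B =====
-- Source B's _gcd: while b: a, b = b, a % b  (Python %, hand-written Euclid loop)
def pvGcdLoop (a b : Int) : Int :=
  if h : b = 0 then a else pvGcdLoop b (PySem.Int.mod a b)
termination_by b.natAbs
decreasing_by
  rcases lt_or_gt_of_ne h with hb | hb
  · have := PySem.Int.mod_neg_bounds a hb; omega
  · have h1 := PySem.Int.mod_nonneg a hb; have h2 := PySem.Int.mod_lt a hb; omega

def check_indentation_consistency_py_alt (lines : List String) : Bool :=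
  let st : Int × Option Int :=
    lines.foldl (fun st line =>
      if PySem.Str.strip line ≠ "" then
        let indent : Int := PySem.Str.len line - PySem.Str.len (PySem.Str.lstrip line)
        if indent > 0 then
          (pvGcdLoop st.1 indent,
           match st.2 with
           | none => some indent
           | some m => if indent < m then some indent else some m)
        else st
      else st) (0, none)
  match st.2 with
  | none => true
  | some m => st.1 == m

-- ===== PRECONDITION & SPEC =====
def Spec_check_indentation_consistency_py (lines : List String) (out : Bool) : Prop := out = check_indentation_consistency_py_alt lines
instance (lines : List String) (out : Bool) : Decidable (Spec_check_indentation_consistency_py lines out) := by unfold Spec_check_indentation_consistency_py; infer_instance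

-- ===== CLAIM (what is proved, stated in full; the proofs are below) =====
def Claim_equal_check_indentation_consistency_py : Prop := ∀ (lines : List String), Dom_check_indentation_consistency_py lines → Spec_check_indentation_consistency_py lines (check_indentation_consistency_py lines)

-- ===== LEMMAS AND PROOFS =====

-- the list of positive indents, recursively (proof-side mirror of the shared collection filter)
def pvIndents : List String → List Int
  | [] => []
  | line :: ls =>
    if PySem.Str.strip line ≠ "" then
      let indent : Int := PySem.Str.len line - PySem.Str.len (PySem.Str.lstrip line)
      if indent > 0 then indent :: pvIndents ls else pvIndents ls
    else pvIndents ls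

lemma pvIndents_pos : ∀ (lines : List String), ∀ i ∈ pvIndents lines, 0 < i := by
  intro lines
  induction lines with
  | nil => simp [pvIndents]
  | cons l ls ih =>
    intro i hi
    simp only [pvIndents] at hi
    split at hi
    · split at hi
      · rcases List.mem_cons.mp hi with rfl | h
        · omega
        · exact ih i h
      · exact ih i hi
    · exact ih i hi

lemma pvIndents_foldA (lines : List String) (acc : List Int) :
    lines.foldl (fun acc line =>
      if PySem.Str.strip line ≠ "" then
        let indent : Int := PySem.Str.len line - PySem.Str.len (PySem.Str.lstrip line)
        if indent > 0 then acc ++ [indent] else acc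
      else acc) acc = acc ++ pvIndents lines := by
  induction lines generalizing acc with
  | nil => simp [pvIndents]
  | cons l ls ih =>
    simp only [List.foldl_cons, pvIndents]
    split
    · split
      · rw [ih]; simp
      · rw [ih]
    · rw [ih]

lemma pvGcdLoop_eq (a b : Int) (ha : 0 ≤ a) (hb : 0 ≤ b) :
    pvGcdLoop a b = (Int.gcd a b : Int) := by
  by_cases h : b = 0
  · subst h; rw [pvGcdLoop]
    simp [Int.gcd, Int.natAbs_of_nonneg ha]
  · have hbpos : 0 < b := lt_of_le_of_ne hb (Ne.symm h)
    rw [pvGcdLoop]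
    simp only [h, dite_false]
    rw [PySem.Int.mod_eq_emod_of_pos hbpos]
    rw [pvGcdLoop_eq b (a % b) hb (Int.emod_nonneg a h)]
    rw [Int.gcd_comm b (a % b), Int.gcd_emod]
termination_by b.natAbs
decreasing_by
  have h1 := Int.emod_nonneg a h
  have h2 := Int.emod_lt_of_pos a hbpos
  omega

-- B's fold, split into the gcd fold and the min fold over pvIndents
lemma pvFoldB (lines : List String) (st : Int × Option Int) :
    lines.foldl (fun st line =>
      if PySem.Str.strip line ≠ "" then
        let indent : Int := PySem.Str.len line - PySem.Str.len (PySem.Str.lstrip line)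
        if indent > 0 then
          (pvGcdLoop st.1 indent,
           match st.2 with
           | none => some indent
           | some m => if indent < m then some indent else some m)
        else st
      else st) st =
    ((pvIndents lines).foldl (fun g i => pvGcdLoop g i) st.1,
     (pvIndents lines).foldl (fun m i =>
        match m with
        | none => some i
        | some m => if i < m then some i else some m) st.2) := by
  induction lines generalizing st with
  | nil => simp [pvIndents]
  | cons l ls ih =>
    simp only [List.foldl_cons, pvIndents]
    split
    · split
      · rw [ih]; rfl
      · rw [ih]
    · rw [ih]

lemma pvMinFold (l : List Int) :
    l.foldl (fun m i =>
        match m with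
        | none => some i
        | some m => if i < m then some i else some m) none = PySem.List.min? l id := by
  unfold PySem.List.min?
  congr 1
  funext m i
  cases m <;> rfl

lemma pvMinFold_ne_none (l : List Int) (x : Int) :
    ∃ m, l.foldl (fun m i =>
        match m with
        | none => some i
        | some m => if i < m then some i else some m) (some x) = some m := by
  induction l generalizing x with
  | nil => exact ⟨x, rfl⟩
  | cons a l ih =>
    simp only [List.foldl_cons]
    split <;> exact ih _

-- properties of the gcd fold
lemma pvGcdFold_spec (l : List Int) : ∀ (g : Int), 0 ≤ g → (∀ i ∈ l, 0 ≤ i) →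
    0 ≤ l.foldl (fun a i => pvGcdLoop a i) g ∧
    l.foldl (fun a i => pvGcdLoop a i) g ∣ g ∧
    (∀ i ∈ l, l.foldl (fun a i => pvGcdLoop a i) g ∣ i) ∧
    (∀ d : Int, d ∣ g → (∀ i ∈ l, d ∣ i) → d ∣ l.foldl (fun a i => pvGcdLoop a i) g) := by
  induction l with
  | nil =>
    intro g hg _
    refine ⟨hg, dvd_rfl, by simp, ?_⟩
    intro d hd _; simpa using hd
  | cons a l ih =>
    intro g hg hl
    simp only [List.foldl_cons]
    have ha : 0 ≤ a := hl a List.mem_cons_self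
    rw [pvGcdLoop_eq g a hg ha]
    obtain ⟨h0, hdvd, h1, h2⟩ := ih (Int.gcd g a) (Int.natCast_nonneg _)
      (fun i hi => hl i (List.mem_cons_of_mem a hi))
    refine ⟨h0, dvd_trans hdvd (Int.gcd_dvd_left g a), ?_, ?_⟩
    · intro i hi
      rcases List.mem_cons.mp hi with h | hi
      · rw [h]; exact dvd_trans hdvd (Int.gcd_dvd_right g a)
      · exact h1 i hi
    · intro d hdg hdl
      exact h2 d (Int.dvd_coe_gcd hdg (hdl a List.mem_cons_self)) fun i hi => hdl i (List.mem_cons_of_mem a hi)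

-- ===== VERDICT (by name: the statement is the Claim_ definition above) =====
theorem check_indentation_consistency_py_spec : Claim_equal_check_indentation_consistency_py := by
  intro lines _
  unfold Spec_check_indentation_consistency_py
  simp only [check_indentation_consistency_py, check_indentation_consistency_py_alt]
  rw [pvIndents_foldA, pvFoldB]
  simp only [List.nil_append]
  set L := pvIndents lines with hLdef
  rcases hL : L with _ | ⟨a, l⟩
  · simp
  · rw [← hL]
    have hne : L ≠ [] := by rw [hL]; simp
    rw [if_neg hne]
    -- the min fold is some m
    have hsome : ∃ m, L.foldl (fun m i =>
        match m with
        | none => some i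
        | some m => if i < m then some i else some m) none = some m := by
      rw [hL]
      simp only [List.foldl_cons]
      exact pvMinFold_ne_none l a
    obtain ⟨m, hm⟩ := hsome
    have hmin? : PySem.List.min? L id = some m := by rw [← pvMinFold]; exact hm
    have hmem : m ∈ L := PySem.List.min?_mem hmin?
    have hmpos : 0 < m := pvIndents_pos lines m (hLdef ▸ hmem)
    rw [hmin?, hm]
    obtain ⟨h0, _, h1, h2⟩ := pvGcdFold_spec L 0 le_rfl
      (fun i hi => le_of_lt (pvIndents_pos lines i (hLdef ▸ hi)))
    rw [Bool.eq_iff_iff]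
    simp only [if_neg (show ¬ m = 0 from by omega), List.all_eq_true, beq_iff_eq,
      PySem.Int.mod_eq_zero_iff_dvd]
    constructor
    · intro h
      exact Int.dvd_antisymm h0 (le_of_lt hmpos) (h1 m hmem) (h2 m (dvd_zero m) h)
    · intro h i hi
      rw [← h]
      exact h1 i hi
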